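-- pv_equiv track=rewrite | github.com/Satwikdas122/POTD_GFG_SOLUTIONS | WifiRange.py | wifiRange
-- ===== SOURCE A (Python) =====
-- def wifiRange(N, S, X):
--     c=0
--     for i in S :
--         if i=='0' :
--             c +=1
--         else :
--             if c > X :
--                 return False
--             c = -X
--     if c>0 :
--         return False
--     else :
--         return True
-- ===== SOURCE B (Python) =====
-- def wifiRange(N, S, X):
--     R = [i for i, ch in enumerate(S) if ch != '0']
--     if not R:
--         return len(S) == 0
--     if R[0] > X or (len(S) - 1 - R[-1]) > X:
--         return False
--     return all(b - a - 1 <= 2 * X for a, b in zip(R, R[1:]))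
-- ===== Notes on version B (the rewrite author's own statement) =====
-- stated objective: alternative
-- what changed: Replaces A's single running -X counter with early returns by an explicit router-index table checked in three independent passes: leading-zeros bound, trailing-zeros bound, and pairwise adjacent gaps <= 2*X.
import Mathlib
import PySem

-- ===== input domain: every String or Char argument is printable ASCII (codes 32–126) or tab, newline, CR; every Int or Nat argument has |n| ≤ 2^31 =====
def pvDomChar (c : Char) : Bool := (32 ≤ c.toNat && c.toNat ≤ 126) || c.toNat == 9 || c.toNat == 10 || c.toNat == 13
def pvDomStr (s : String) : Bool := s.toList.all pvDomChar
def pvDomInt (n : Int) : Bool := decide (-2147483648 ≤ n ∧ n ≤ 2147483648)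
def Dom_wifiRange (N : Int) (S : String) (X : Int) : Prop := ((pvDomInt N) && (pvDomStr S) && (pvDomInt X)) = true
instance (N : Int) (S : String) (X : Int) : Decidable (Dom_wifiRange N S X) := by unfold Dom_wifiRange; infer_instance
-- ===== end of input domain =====

-- B replaces A's running -X counter (with early returns) by an explicit router-index
-- table checked via leading/trailing bounds and pairwise adjacent gaps; same cost, no speed claim.

-- ===== PORT A =====
-- the for-loop over S; `none` = the early `return False`, `some c` = loop finished with counter c
def wifiRangeLoop (X : Int) : List Char → Int → Option Int
  | [], c => some c
  | i :: rest, c =>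
    if i = '0' then wifiRangeLoop X rest (c + 1)
    else if c > X then none
    else wifiRangeLoop X rest (-X)

def wifiRange (N : Int) (S : String) (X : Int) : Bool :=
  match wifiRangeLoop X S.toList 0 with
  | none => false
  | some c => if c > 0 then false else true

-- ===== PORT B =====
def wifiRange_alt (N : Int) (S : String) (X : Int) : Bool :=
  let L := S.toList
  let R : List Int := (PySem.List.enumerate L 0).filterMap
    (fun p => if p.2 ≠ '0' then some p.1 else none)
  match R with
  | [] => decide (L.length = 0)
  | r0 :: _ =>
    if r0 > X ∨ (L.length : Int) - 1 - R.getLast! > X then false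
    else (R.zip R.tail).all (fun p => decide (p.2 - p.1 - 1 ≤ 2 * X))

-- ===== PRECONDITION & SPEC =====
def Spec_wifiRange (N : Int) (S : String) (X : Int) (out : Bool) : Prop := out = wifiRange_alt N S X
instance (N : Int) (S : String) (X : Int) (out : Bool) : Decidable (Spec_wifiRange N S X out) := by unfold Spec_wifiRange; infer_instance

-- ===== CLAIM (what is proved, stated in full; the proofs are below) =====
def Claim_equal_wifiRange : Prop := ∀ (N : Int) (S : String) (X : Int), Dom_wifiRange N S X → Spec_wifiRange N S X (wifiRange N S X)

-- ===== LEMMAS AND PROOFS =====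

-- zero-run lengths of the string, separated by routers; always nonempty, length = #routers + 1
def runs : List Char → List Nat
  | [] => [0]
  | c :: rest =>
    if c = '0' then
      match runs rest with
      | g :: gs => (g + 1) :: gs
      | [] => [1]
    else 0 :: runs rest

-- shared reference semantics on the run list
def specRuns (X : Int) : List Nat → Int → Bool
  | [], _ => true
  | [g], c => decide (c + (g : Int) ≤ 0)
  | g :: g2 :: gs, c => decide (c + (g : Int) ≤ X) && specRuns X (g2 :: gs) (-X)

-- router indices reconstructed from the run list, starting at offset n
def idxList : List Nat → Int → List Int
  | [], _ => []
  | [_], _ => []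
  | g :: g2 :: gs, n => (n + (g : Int)) :: idxList (g2 :: gs) (n + g + 1)

def sumInt : List Nat → Int
  | [] => 0
  | g :: gs => (g : Int) + sumInt gs

def lenOf (gs : List Nat) : Int := sumInt gs + gs.length - 1

theorem gl_singleton {α : Type} [Inhabited α] (a : α) : ([a]).getLast! = a := rfl

theorem gl_cons_cons {α : Type} [Inhabited α] (a b : α) (l : List α) :
    (a :: b :: l).getLast! = (b :: l).getLast! := by
  simp [List.getLast!]

theorem runs_ne_nil : ∀ L : List Char, runs L ≠ [] := by
  intro L
  cases L with
  | nil => simp [runs]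
  | cons c rest =>
    simp only [runs]
    split
    · rcases h : runs rest with _ | ⟨g, gs⟩ <;> simp
    · simp

theorem idxList_arg_congr (gs : List Nat) (n m : Int) (h : n = m) :
    idxList gs n = idxList gs m := by rw [h]

theorem idxList_shift (g : Nat) (gs : List Nat) (n : Int) :
    idxList ((g + 1) :: gs) n = idxList (g :: gs) (n + 1) := by
  rcases gs with _ | ⟨g2, gs'⟩
  · rfl
  · show (n + ((g : Nat) + 1 : Nat)) :: idxList (g2 :: gs') (n + ((g : Nat) + 1 : Nat) + 1)
      = (n + 1 + (g : Int)) :: idxList (g2 :: gs') (n + 1 + g + 1)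
    congr 1
    · push_cast; ring
    · apply idxList_arg_congr; push_cast; ring

theorem specRuns_succ (X : Int) (g : Nat) (gs : List Nat) (c : Int) :
    specRuns X ((g + 1) :: gs) c = specRuns X (g :: gs) (c + 1) := by
  rcases gs with _ | ⟨g2, gs'⟩
  · simp only [specRuns, decide_eq_decide]; push_cast; omega
  · simp only [specRuns]
    congr 1
    simp only [decide_eq_decide]; push_cast; omega

theorem loop_eq_specRuns (X : Int) : ∀ (L : List Char) (c : Int),
    (match wifiRangeLoop X L c with
     | none => false
     | some c' => if c' > 0 then false else true) = specRuns X (runs L) c := by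
  intro L
  induction L with
  | nil =>
    intro c
    simp only [wifiRangeLoop, runs, specRuns]
    by_cases h : c > 0
    · rw [if_pos h]; symm; simp only [decide_eq_false_iff_not]; push_cast; omega
    · rw [if_neg h]; symm; simp only [decide_eq_true_eq]; push_cast; omega
  | cons ch rest ih =>
    intro c
    by_cases hch : ch = '0'
    · subst hch
      rcases h : runs rest with _ | ⟨g, gs⟩
      · exact absurd h (runs_ne_nil rest)
      · have hr : runs ('0' :: rest) = (g + 1) :: gs := by
          simp only [runs, h, reduceIte]
        rw [hr, specRuns_succ]
        have hl : wifiRangeLoop X ('0' :: rest) c = wifiRangeLoop X rest (c + 1) := by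
          simp [wifiRangeLoop]
        rw [hl, ih (c + 1), h]
    · have hr : runs (ch :: rest) = 0 :: runs rest := by
        simp only [runs, if_neg hch]
      have hl : wifiRangeLoop X (ch :: rest) c
          = (if c > X then none else wifiRangeLoop X rest (-X)) := by
        simp only [wifiRangeLoop, if_neg hch]
      rw [hr, hl]
      rcases h : runs rest with _ | ⟨g, gs⟩
      · exact absurd h (runs_ne_nil rest)
      · have hs : specRuns X (0 :: g :: gs) c
            = (decide (c + ((0 : Nat) : Int) ≤ X) && specRuns X (g :: gs) (-X)) := rfl
        rw [hs]
        by_cases hc : c > X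
        · rw [if_pos hc]
          have : decide (c + ((0 : Nat) : Int) ≤ X) = false := by
            simp only [decide_eq_false_iff_not]; push_cast; omega
          rw [this, Bool.false_and]
        · rw [if_neg hc]
          have : decide (c + ((0 : Nat) : Int) ≤ X) = true := by
            simp only [decide_eq_true_eq]; push_cast; omega
          rw [this, Bool.true_and, ih (-X), h]

-- the port's filterMap over enumerate equals idxList of the runs
theorem filter_eq_idxList : ∀ (L : List Char) (n : Int),
    (PySem.List.enumerate L n).filterMap
      (fun p => if p.2 ≠ '0' then some p.1 else none) = idxList (runs L) n := by
  intro L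
  induction L with
  | nil => intro n; simp [PySem.List.enumerate_nil, runs, idxList]
  | cons ch rest ih =>
    intro n
    rw [PySem.List.enumerate_cons]
    by_cases hch : ch = '0'
    · subst hch
      rcases h : runs rest with _ | ⟨g, gs⟩
      · exact absurd h (runs_ne_nil rest)
      · have hr : runs ('0' :: rest) = (g + 1) :: gs := by
          simp only [runs, h, reduceIte]
        have hstep : List.filterMap (fun (p : Int × Char) => if p.2 ≠ '0' then some p.1 else none)
            ((n, '0') :: PySem.List.enumerate rest (n + 1))
            = List.filterMap (fun (p : Int × Char) => if p.2 ≠ '0' then some p.1 else none)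
              (PySem.List.enumerate rest (n + 1)) := by simp
        rw [hstep, ih (n + 1), h, hr, idxList_shift]
    · have hr : runs (ch :: rest) = 0 :: runs rest := by
        simp only [runs, if_neg hch]
      have hstep : List.filterMap (fun (p : Int × Char) => if p.2 ≠ '0' then some p.1 else none)
          ((n, ch) :: PySem.List.enumerate rest (n + 1))
          = n :: List.filterMap (fun (p : Int × Char) => if p.2 ≠ '0' then some p.1 else none)
            (PySem.List.enumerate rest (n + 1)) := by simp [hch]
      rw [hstep, ih (n + 1), hr]
      rcases h : runs rest with _ | ⟨g, gs⟩
      · exact absurd h (runs_ne_nil rest)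
      · show n :: idxList (g :: gs) (n + 1)
          = (n + ((0 : Nat) : Int)) :: idxList (g :: gs) (n + ((0 : Nat) : Int) + 1)
        congr 1
        · push_cast; ring
        · apply idxList_arg_congr; push_cast; ring

theorem length_eq_lenOf : ∀ L : List Char, (L.length : Int) = lenOf (runs L) := by
  intro L
  induction L with
  | nil => simp [runs, lenOf, sumInt]
  | cons ch rest ih =>
    by_cases hch : ch = '0'
    · subst hch
      rcases h : runs rest with _ | ⟨g, gs⟩
      · exact absurd h (runs_ne_nil rest)
      · have hr : runs ('0' :: rest) = (g + 1) :: gs := by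
          simp only [runs, h, reduceIte]
        rw [h] at ih
        rw [hr]
        simp only [List.length_cons, lenOf, sumInt] at ih ⊢
        push_cast at ih ⊢
        omega
    · have hr : runs (ch :: rest) = 0 :: runs rest := by
        simp only [runs, if_neg hch]
      rcases h : runs rest with _ | ⟨g, gs⟩
      · exact absurd h (runs_ne_nil rest)
      · rw [h] at ih
        rw [hr, h]
        simp only [List.length_cons, lenOf, sumInt] at ih ⊢
        push_cast at ih ⊢
        omega

theorem idxList_ne_nil (g g2 : Nat) (gs : List Nat) (n : Int) :
    idxList (g :: g2 :: gs) n ≠ [] := by simp [idxList]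

-- trailing-zeros identity: (n + lenOf (g::gs)) - 1 - last router = last run
theorem trailing_idxList : ∀ (gs : List Nat) (g : Nat) (n : Int), gs ≠ [] →
    n + lenOf (g :: gs) - 1 - (idxList (g :: gs) n).getLast! = (gs.getLast! : Int) := by
  intro gs
  induction gs with
  | nil => intro g n h; exact absurd rfl h
  | cons g1 rest ih =>
    intro g n _
    rcases rest with _ | ⟨g2, rest'⟩
    · rw [show idxList [g, g1] n = [n + (g : Int)] from rfl, gl_singleton, gl_singleton]
      simp only [lenOf, sumInt, List.length_cons, List.length_nil]
      push_cast
      ring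
    · have h1 : idxList (g :: g1 :: g2 :: rest') n
          = (n + (g : Int)) :: idxList (g1 :: g2 :: rest') (n + g + 1) := rfl
      rw [h1]
      rcases h2 : idxList (g1 :: g2 :: rest') (n + g + 1) with _ | ⟨a, l⟩
      · exact absurd h2 (idxList_ne_nil g1 g2 rest' _)
      · rw [gl_cons_cons, ← h2]
        have hih := ih g1 (n + g + 1) (by simp)
        rw [show (n + (g : Int) + 1) + lenOf (g1 :: g2 :: rest')
              = n + lenOf (g :: g1 :: g2 :: rest') by
          simp only [lenOf, sumInt, List.length_cons]; push_cast; ring] at hih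
        rw [hih, gl_cons_cons]

-- pairwise gaps of the router list are exactly the middle runs
theorem gaps_idxList : ∀ (gs : List Nat) (g : Nat) (n : Int) (X : Int),
    ((idxList (g :: gs) n).zip (idxList (g :: gs) n).tail).all
      (fun p => decide (p.2 - p.1 - 1 ≤ 2 * X))
    = (gs.dropLast).all (fun g => decide ((g : Int) ≤ 2 * X)) := by
  intro gs
  induction gs with
  | nil => intro g n X; simp [idxList]
  | cons g1 rest ih =>
    intro g n X
    rcases rest with _ | ⟨g2, rest'⟩
    · simp [idxList]
    · have h1 : idxList (g :: g1 :: g2 :: rest') n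
          = (n + (g : Int)) :: idxList (g1 :: g2 :: rest') (n + g + 1) := rfl
      have h2 : idxList (g1 :: g2 :: rest') (n + g + 1)
          = ((n + (g : Int) + 1) + (g1 : Int)) :: idxList (g2 :: rest') (n + (g : Int) + 1 + g1 + 1) := rfl
      have hih := ih g1 (n + g + 1) X
      rw [h2] at hih
      rw [h1]
      conv_lhs => rw [h2]
      rw [List.tail_cons, List.zip_cons_cons, List.all_cons]
      rw [List.tail_cons] at hih
      rw [hih]
      rw [show (g1 :: g2 :: rest').dropLast = g1 :: (g2 :: rest').dropLast by
        simp [List.dropLast], List.all_cons]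
      congr 1
      simp only [decide_eq_decide]
      omega

-- the specRuns tail equals the middle-gaps + trailing conditions
theorem specRuns_tail (X : Int) : ∀ (gs : List Nat), gs ≠ [] →
    specRuns X gs (-X)
    = ((gs.dropLast).all (fun g => decide ((g : Int) ≤ 2 * X)) && decide ((gs.getLast! : Int) ≤ X)) := by
  intro gs
  induction gs with
  | nil => intro h; exact absurd rfl h
  | cons g1 rest ih =>
    intro _
    rcases rest with _ | ⟨g2, rest'⟩
    · rw [show ([g1] : List Nat).dropLast = [] from rfl, gl_singleton]
      simp only [specRuns, List.all_nil, Bool.true_and, decide_eq_decide]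
      omega
    · have h1 : specRuns X (g1 :: g2 :: rest') (-X)
          = (decide (-X + (g1 : Int) ≤ X) && specRuns X (g2 :: rest') (-X)) := rfl
      rw [h1, ih (by simp)]
      rw [show (g1 :: g2 :: rest').dropLast = g1 :: (g2 :: rest').dropLast by
        simp [List.dropLast]]
      rw [List.all_cons, gl_cons_cons]
      rw [show decide (-X + (g1 : Int) ≤ X) = decide ((g1 : Int) ≤ 2 * X) by
        simp only [decide_eq_decide]; omega]
      rw [Bool.and_assoc]

theorem main_eq (X : Int) (L : List Char) :
    (match wifiRangeLoop X L 0 with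
     | none => false
     | some c' => if c' > 0 then false else true)
    = (match idxList (runs L) 0 with
       | [] => decide (L.length = 0)
       | r0 :: _ =>
         if r0 > X ∨ (L.length : Int) - 1 - (idxList (runs L) 0).getLast! > X then false
         else ((idxList (runs L) 0).zip (idxList (runs L) 0).tail).all
           (fun p => decide (p.2 - p.1 - 1 ≤ 2 * X))) := by
  rw [loop_eq_specRuns]
  have hlen := length_eq_lenOf L
  rcases h : runs L with _ | ⟨g, gs⟩
  · exact absurd h (runs_ne_nil L)
  · try rw [h] at hlen
    try rw [h]
    rcases gs with _ | ⟨g2, gs'⟩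
    · -- no routers: runs L = [g], so length = g and there is nothing to check but emptiness
      show specRuns X [g] 0 = decide (L.length = 0)
      have hg : (L.length : Int) = (g : Int) := by
        simp only [lenOf, sumInt, List.length_cons, List.length_nil] at hlen
        push_cast at hlen ⊢; omega
      simp only [specRuns, decide_eq_decide]
      omega
    · -- at least one router
      have hr : idxList (g :: g2 :: gs') 0
          = ((0 : Int) + (g : Int)) :: idxList (g2 :: gs') (0 + (g : Int) + 1) := rfl
      rw [hr]
      show (decide ((0 : Int) + (g : Int) ≤ X) && specRuns X (g2 :: gs') (-X))
        = (if (0 : Int) + (g : Int) > X ∨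
              (L.length : Int) - 1
                - (((0 : Int) + (g : Int)) :: idxList (g2 :: gs') (0 + (g : Int) + 1)).getLast! > X
           then false
           else ((((0 : Int) + (g : Int)) :: idxList (g2 :: gs') (0 + (g : Int) + 1)).zip
                  (((0 : Int) + (g : Int)) :: idxList (g2 :: gs') (0 + (g : Int) + 1)).tail).all
                (fun p => decide (p.2 - p.1 - 1 ≤ 2 * X)))
      rw [specRuns_tail X (g2 :: gs') (by simp)]
      have htrail : (L.length : Int) - 1
            - (((0 : Int) + (g : Int)) :: idxList (g2 :: gs') (0 + (g : Int) + 1)).getLast!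
          = (((g2 :: gs').getLast! : Nat) : Int) := by
        rw [← hr, hlen]
        have := trailing_idxList (g2 :: gs') g 0 (by simp)
        rw [show (0 : Int) + lenOf (g :: g2 :: gs') - 1 = lenOf (g :: g2 :: gs') - 1 by ring] at this
        exact this
      rw [htrail]
      have hgaps := gaps_idxList (g2 :: gs') g 0 X
      rw [hr] at hgaps
      rw [hgaps]
      by_cases hb1 : (0 : Int) + (g : Int) > X
      · rw [if_pos (Or.inl hb1)]
        rw [show decide ((0 : Int) + (g : Int) ≤ X) = false by
          simp only [decide_eq_false_iff_not]; omega, Bool.false_and]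
      · by_cases hb2 : (((g2 :: gs').getLast! : Nat) : Int) > X
        · rw [if_pos (Or.inr hb2)]
          rw [show decide ((((g2 :: gs').getLast! : Nat) : Int) ≤ X) = false by
            simp only [decide_eq_false_iff_not]; omega, Bool.and_false, Bool.and_false]
        · rw [if_neg (by push Not; exact ⟨by omega, by omega⟩)]
          rw [show decide ((0 : Int) + (g : Int) ≤ X) = true by
            simp only [decide_eq_true_eq]; omega, Bool.true_and]
          rw [show decide ((((g2 :: gs').getLast! : Nat) : Int) ≤ X) = true by
            simp only [decide_eq_true_eq]; omega, Bool.and_true]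

-- ===== VERDICT (by name: the statement is the Claim_ definition above) =====
theorem wifiRange_spec : Claim_equal_wifiRange := by
  intro N S X _
  show wifiRange N S X = wifiRange_alt N S X
  simp only [wifiRange, wifiRange_alt]
  rw [filter_eq_idxList]
  exact main_eq X S.toList
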